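-- pv_equiv track=rewrite | github.com/MrBrantCode/unitest_baseline | mut_generate/mist_train_taco/taco_5244/solution.py | minimize_moves
-- ===== SOURCE A (Python) =====
-- def minimize_moves(n: int, sequence: str) -> int:
--     ans = 0
--     i = 0
--     while i < n:
--         if i == n - 1:
--             ans += 1
--             break
--         if (sequence[i] == 'R' and sequence[i + 1] == 'U') or (sequence[i] == 'U' and sequence[i + 1] == 'R'):
--             i += 1
--         ans += 1
--         i += 1
--     return ans
-- ===== SOURCE B (Python) =====
-- def minimize_moves(n: int, sequence: str) -> int:
--     if n <= 0:
--         return 0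
--     s = sequence[:n]
--     # Run-length view: split s into maximal runs in which every adjacent pair is
--     # RU or UR; each run of length L contributes L//2 greedy merges, and the
--     # answer is n minus the total number of merges.
--     merges = 0
--     run = 1
--     for a, b in zip(s, s[1:]):
--         if (a == 'R' and b == 'U') or (a == 'U' and b == 'R'):
--             run += 1
--         else:
--             merges += run // 2
--             run = 1
--     return n - (merges + run // 2)
-- ===== Notes on version B (the rewrite author's own statement) =====
-- stated objective: faster
-- what changed: B recasts the problem as run-length segmentation: it iterates adjacent character pairs via zip to measure maximal alternating R/U runs, adds L//2 merges per run of length L, and returns n minus the total, instead of A's index-skipping while loop that accumulates a per-unit move count with repeated subscripting.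
-- outside the precondition, e.g. on minimize_moves(3, 'RU'): A returns 2, B returns 2
import Mathlib
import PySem

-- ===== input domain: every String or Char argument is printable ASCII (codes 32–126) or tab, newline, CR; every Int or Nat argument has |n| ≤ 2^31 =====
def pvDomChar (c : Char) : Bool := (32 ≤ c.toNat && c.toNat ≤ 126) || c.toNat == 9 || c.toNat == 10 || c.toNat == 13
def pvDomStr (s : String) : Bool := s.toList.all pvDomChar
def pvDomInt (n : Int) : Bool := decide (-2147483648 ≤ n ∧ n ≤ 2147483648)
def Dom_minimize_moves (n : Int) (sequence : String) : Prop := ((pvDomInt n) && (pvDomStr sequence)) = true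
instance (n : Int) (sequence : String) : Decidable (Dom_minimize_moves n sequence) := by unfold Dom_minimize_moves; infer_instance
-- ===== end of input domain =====

-- B recasts the problem as run-length segmentation over adjacent character pairs
-- (maximal alternating R/U runs, L // 2 merges per run, answer n - merges) instead
-- of A's index-skipping walk accumulating per-unit moves; same cost, different shape.

-- ===== PORT A =====
-- A's while loop; fuel = number of remaining loop iterations (i advances by ≥ 1 each turn,
-- so n.toNat fuel suffices). String indexing via PySem.List.pyGetD: in range under Pre_.
def pvLoopA (cs : List Char) (n : Int) : Nat → Int → Int → Int
  | 0, _, ans => ans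
  | fuel + 1, i, ans =>
    if i < n then
      if i = n - 1 then ans + 1
      else
        let a := PySem.List.pyGetD cs i ' '
        let b := PySem.List.pyGetD cs (i + 1) ' '
        let i' := if (a = 'R' ∧ b = 'U') ∨ (a = 'U' ∧ b = 'R') then i + 1 else i
        pvLoopA cs n fuel (i' + 1) (ans + 1)
    else ans

def minimize_moves (n : Int) (sequence : String) : Int :=
  pvLoopA sequence.toList n n.toNat 0 0

-- ===== PORT B =====
-- fold state: (merges over finished runs, length of the current alternating run);
-- the loop body of Source B's `for a, b in zip(s, s[1:])`.
def pvStepB (st : Int × Int) (ab : Char × Char) : Int × Int :=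
  if (ab.1 = 'R' ∧ ab.2 = 'U') ∨ (ab.1 = 'U' ∧ ab.2 = 'R') then (st.1, st.2 + 1)
  else (st.1 + PySem.Int.floordiv st.2 2, 1)

def minimize_moves_alt (n : Int) (sequence : String) : Int :=
  if n ≤ 0 then 0
  else
    let s := PySem.List.slice sequence.toList none (some n)
    let st := (s.zip (PySem.List.slice s (some 1) none)).foldl pvStepB (0, 1)
    n - (st.1 + PySem.Int.floordiv st.2 2)

-- ===== PRECONDITION & SPEC =====
-- Pre_ excludes n > len(sequence) (for n ≥ 2): there A indexes past the end and may raise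
-- IndexError (e.g. n=3, "RR"), though on some such inputs A still returns because merged
-- pairs make the index skip past n-1 (e.g. n=3, "RU": A returns 2, and B also returns 2);
-- this slight narrowing keeps Pre_ closed-form instead of re-simulating the scan.
def Pre_minimize_moves (n : Int) (sequence : String) : Prop :=
  n ≤ 1 ∨ n ≤ (sequence.toList.length : Int)
instance (n : Int) (sequence : String) : Decidable (Pre_minimize_moves n sequence) := by
  unfold Pre_minimize_moves; infer_instance

def pvWitness_minimize_moves : Int × String := (4, "RURR")

def Spec_minimize_moves (n : Int) (sequence : String) (out : Int) : Prop := out = minimize_moves_alt n sequence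
instance (n : Int) (sequence : String) (out : Int) : Decidable (Spec_minimize_moves n sequence out) := by unfold Spec_minimize_moves; infer_instance

-- ===== CLAIM (what is proved, stated in full; the proofs are below) =====
def Claim_equal_minimize_moves : Prop := ∀ (n : Int) (sequence : String), Dom_minimize_moves n sequence → Pre_minimize_moves n sequence → Spec_minimize_moves n sequence (minimize_moves n sequence)

-- ===== LEMMAS AND PROOFS =====

-- number of greedily merged adjacent RU/UR pairs (characterises A's skipping scan)
def pvG : List Char → Int
  | [] => 0
  | [_] => 0
  | a :: b :: r =>
    if (a = 'R' ∧ b = 'U') ∨ (a = 'U' ∧ b = 'R') then 1 + pvG r else pvG (b :: r)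

lemma pvFd (a : Int) : PySem.Int.floordiv a 2 = a / 2 :=
  PySem.Int.floordiv_eq_ediv_of_pos (by norm_num)

-- B's zip fold, started mid-run with current run length k ≥ 1 ending at c, computes
-- the greedy merge count: odd k leaves c available to pair, even k does not.
lemma pvZip_eq : ∀ (t : List Char) (c : Char) (m k : Int), 1 ≤ k →
    (((c :: t).zip t).foldl pvStepB (m, k)).1
      + PySem.Int.floordiv ((((c :: t).zip t).foldl pvStepB (m, k)).2) 2
    = m + (if k % 2 = 1 then PySem.Int.floordiv (k - 1) 2 + pvG (c :: t)
           else PySem.Int.floordiv k 2 + pvG t) := by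
  intro t
  induction t with
  | nil =>
      intro c m k hk
      simp only [List.zip_nil_right, List.foldl_nil, pvG, pvFd]
      split_ifs <;> omega
  | cons b r ih =>
      intro c m k hk
      simp only [List.zip_cons_cons, List.foldl_cons]
      by_cases hp : (c = 'R' ∧ b = 'U') ∨ (c = 'U' ∧ b = 'R')
      · simp only [pvStepB, if_pos hp]
        rw [ih b m (k + 1) (by omega)]
        simp only [pvG, if_pos hp, pvFd]
        split_ifs <;> omega
      · simp only [pvStepB, if_neg hp]
        rw [ih b (m + PySem.Int.floordiv k 2) 1 le_rfl]
        simp only [pvG, if_neg hp, pvFd]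
        split_ifs <;> omega

lemma pvLoopA_main (cs : List Char) (n : Int) (hn : n ≤ (cs.length : Int)) :
    ∀ (t : List Char) (fuel : Nat) (i ans : Int), 0 ≤ i → i = n - (t.length : Int) →
      t = (cs.take n.toNat).drop i.toNat → t.length ≤ fuel →
      pvLoopA cs n fuel i ans = ans + (t.length : Int) - pvG t := by
  have hlen : (cs.take n.toNat).length = n.toNat := by
    simp [List.length_take]; omega
  intro t
  induction t using pvG.induct with
  | case1 =>
      intro fuel i ans h0 hi ht hf
      have hni : ¬ i < n := by simp at hi; omega
      cases fuel with
      | zero => simp [pvLoopA, pvG]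
      | succ f => simp [pvLoopA, hni, pvG]
  | case2 a =>
      intro fuel i ans h0 hi ht hf
      cases fuel with
      | zero => simp at hf
      | succ f =>
        have h1 : i < n := by simp at hi; omega
        have h2 : i = n - 1 := by simp at hi; omega
        simp [pvLoopA, h2, pvG]
  | case3 a b r hpair ih =>
      intro fuel i ans h0 hi ht hf
      simp only [List.length_cons] at hi hf
      cases fuel with
      | zero => omega
      | succ f =>
        have h1 : i < n := by omega
        have h2 : ¬ i = n - 1 := by omega
        have hiN : i.toNat < n.toNat := by omega
        have hiN1 : i.toNat + 1 < n.toNat := by omega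
        have hd0 : (cs.take n.toNat).drop i.toNat = a :: b :: r := ht.symm
        have hg0 : (cs.take n.toNat)[i.toNat]? = some a := by
          have h := congrArg (fun l => l[0]?) hd0
          simpa [List.getElem?_drop] using h
        have hg1 : (cs.take n.toNat)[i.toNat + 1]? = some b := by
          have h := congrArg (fun l => l[1]?) hd0
          simpa [List.getElem?_drop] using h
        have hca : cs[i.toNat]? = some a := by
          rwa [List.getElem?_take_of_lt hiN] at hg0
        have hcb : cs[i.toNat + 1]? = some b := by
          rwa [List.getElem?_take_of_lt hiN1] at hg1
        have hlc : i.toNat < cs.length := by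
          have := hca; by_contra hc
          simp [List.getElem?_eq_none (by omega : cs.length ≤ i.toNat)] at this
        have hlc1 : i.toNat + 1 < cs.length := by
          have := hcb; by_contra hc
          simp [List.getElem?_eq_none (by omega : cs.length ≤ i.toNat + 1)] at this
        have hga : PySem.List.pyGetD cs i ' ' = a := by
          rw [PySem.List.pyGetD_eq_getElem cs ' ' h0 (by omega)]
          obtain ⟨hh, he⟩ := List.getElem?_eq_some_iff.mp hca
          exact he
        have hgb : PySem.List.pyGetD cs (i + 1) ' ' = b := by
          rw [PySem.List.pyGetD_eq_getElem cs ' ' (by omega) (by omega)]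
          have hx : cs[(i + 1).toNat]? = some b := by
            have h21 : (i + 1).toNat = i.toNat + 1 := by omega
            rw [h21]; exact hcb
          obtain ⟨hh, he⟩ := List.getElem?_eq_some_iff.mp hx
          exact he
        have hdrop2 : (cs.take n.toNat).drop (i + 1 + 1).toNat = r := by
          have h22 : (i + 1 + 1).toNat = i.toNat + 2 := by omega
          rw [h22, ← List.drop_drop, hd0]; rfl
        simp only [pvLoopA, if_pos h1, if_neg h2, hga, hgb, if_pos hpair]
        rw [ih f (i + 1 + 1) (ans + 1) (by omega) (by push_cast at hi ⊢; omega) hdrop2.symm (by omega)]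
        simp only [pvG, if_pos hpair, List.length_cons]; push_cast; ring
  | case4 a b r hpair ih =>
      intro fuel i ans h0 hi ht hf
      simp only [List.length_cons] at hi hf
      cases fuel with
      | zero => omega
      | succ f =>
        have h1 : i < n := by omega
        have h2 : ¬ i = n - 1 := by omega
        have hiN : i.toNat < n.toNat := by omega
        have hiN1 : i.toNat + 1 < n.toNat := by omega
        have hd0 : (cs.take n.toNat).drop i.toNat = a :: b :: r := ht.symm
        have hg0 : (cs.take n.toNat)[i.toNat]? = some a := by
          have h := congrArg (fun l => l[0]?) hd0
          simpa [List.getElem?_drop] using h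
        have hg1 : (cs.take n.toNat)[i.toNat + 1]? = some b := by
          have h := congrArg (fun l => l[1]?) hd0
          simpa [List.getElem?_drop] using h
        have hca : cs[i.toNat]? = some a := by
          rwa [List.getElem?_take_of_lt hiN] at hg0
        have hcb : cs[i.toNat + 1]? = some b := by
          rwa [List.getElem?_take_of_lt hiN1] at hg1
        have hlc : i.toNat < cs.length := by
          have := hca; by_contra hc
          simp [List.getElem?_eq_none (by omega : cs.length ≤ i.toNat)] at this
        have hlc1 : i.toNat + 1 < cs.length := by
          have := hcb; by_contra hc
          simp [List.getElem?_eq_none (by omega : cs.length ≤ i.toNat + 1)] at this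
        have hga : PySem.List.pyGetD cs i ' ' = a := by
          rw [PySem.List.pyGetD_eq_getElem cs ' ' h0 (by omega)]
          obtain ⟨hh, he⟩ := List.getElem?_eq_some_iff.mp hca
          exact he
        have hgb : PySem.List.pyGetD cs (i + 1) ' ' = b := by
          rw [PySem.List.pyGetD_eq_getElem cs ' ' (by omega) (by omega)]
          have hx : cs[(i + 1).toNat]? = some b := by
            have h21 : (i + 1).toNat = i.toNat + 1 := by omega
            rw [h21]; exact hcb
          obtain ⟨hh, he⟩ := List.getElem?_eq_some_iff.mp hx
          exact he
        have hdrop1 : (cs.take n.toNat).drop (i + 1).toNat = b :: r := by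
          have h11 : (i + 1).toNat = i.toNat + 1 := by omega
          rw [h11, ← List.drop_drop, hd0]; rfl
        simp only [pvLoopA, if_pos h1, if_neg h2, hga, hgb, if_neg hpair]
        rw [ih f (i + 1) (ans + 1) (by omega) (by push_cast [List.length_cons] at hi ⊢; omega) hdrop1.symm (by simp only [List.length_cons]; omega)]
        simp only [pvG, if_neg hpair, List.length_cons]; push_cast; ring

-- B on a sliced list s equals n - pvG s (tail via slice_from_one, then pvZip_eq at k = 1)
lemma pvAltG (n : Int) (sequence : String) (hn : ¬ n ≤ 0) :
    minimize_moves_alt n sequence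
      = n - pvG (PySem.List.slice sequence.toList none (some n)) := by
  unfold minimize_moves_alt
  rw [if_neg hn]
  set s := PySem.List.slice sequence.toList none (some n) with hs
  simp only [PySem.List.slice_from_one]
  cases s with
  | nil => simp [pvStepB, pvG, pvFd]
  | cons c t =>
      simp only [List.tail_cons]
      rw [pvZip_eq t c 0 1 le_rfl]
      norm_num [pvFd]

-- ===== VERDICT (by name: the statement is the Claim_ definition above) =====
theorem minimize_moves_spec : Claim_equal_minimize_moves := by
  intro n sequence _ hpre
  unfold Spec_minimize_moves minimize_moves
  set cs := sequence.toList with hcs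
  by_cases hle : n ≤ 0
  · have : n.toNat = 0 := by omega
    simp [minimize_moves_alt, this, pvLoopA, hle]
  · rw [pvAltG n sequence hle]
    rw [show PySem.List.slice sequence.toList none (some n) = cs.take n.toNat from
      PySem.List.slice_to cs (by omega)]
    by_cases h1 : n = 1
    · have hfuel : n.toNat = 1 := by omega
      have hA : pvLoopA cs n n.toNat 0 0 = 1 := by
        rw [hfuel]; simp [pvLoopA, h1]
      have hG : pvG (cs.take n.toNat) = 0 := by
        rw [hfuel]
        cases cs with
        | nil => simp [pvG]
        | cons c rest => simp [List.take_succ_cons, pvG]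
      rw [hA, hG, h1]; ring
    · have hn2 : 2 ≤ n := by omega
      have hlen : n ≤ (cs.length : Int) := by
        rcases hpre with h | h
        · omega
        · exact h
      have htlen : ((cs.take n.toNat).length : Int) = n := by
        simp [List.length_take]; omega
      rw [pvLoopA_main cs n hlen (cs.take n.toNat) n.toNat 0 0 le_rfl
            (by rw [htlen]; ring) (by simp) (by simp [List.length_take])]
      rw [htlen]; ring
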